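-- pv_equiv track=rewrite | github.com/johannesnicolaus/TOGA2 | src/python/modules/intron_gain_check.py | binary_streaks
-- ===== SOURCE A (Python) =====
-- from typing import Any, Dict, Iterable, List, Optional, Tuple, TypeVar, Union
--
-- def binary_streaks(all_values: List[Any], heads: List[Any]) -> List[List[Any]]:
--     """ """
--     all_streaks: List[List[Any]] = []
--     curr_streak: List[Any] = []
--     heads_streak: bool = False
--     for x in all_values:
--         is_heads: bool = x in heads
--         # if is_heads != heads_streak:
--         if is_heads != heads_streak or is_heads and heads_streak:
--             if curr_streak:
--                 all_streaks.append(curr_streak)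
--             curr_streak = []
--             heads_streak = is_heads
--         curr_streak.append(x)
--     if curr_streak:
--         all_streaks.append(curr_streak)
--     return all_streaks
-- ===== SOURCE B (Python) =====
-- def binary_streaks(all_values, heads):
--     """Two-pointer scan: find the next head with an inner scan, slice out the
--     whole preceding non-head run in one step, emit the head as a singleton."""
--     streaks = []
--     n = len(all_values)
--     i = 0
--     while i < n:
--         j = i
--         while j < n and all_values[j] not in heads:
--             j += 1
--         if j > i:
--             streaks.append(all_values[i:j])
--         if j < n:
--             streaks.append([all_values[j]])
--         i = j + 1
--     return streaks
-- ===== Notes on version B (the rewrite author's own statement) =====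
-- stated objective: alternative
-- what changed: Replaces A's element-by-element state machine (heads_streak flag, growing curr_streak) with a two-pointer scan that locates the next head with an inner scan and slices the whole preceding non-head run out in one step.
import Mathlib
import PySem

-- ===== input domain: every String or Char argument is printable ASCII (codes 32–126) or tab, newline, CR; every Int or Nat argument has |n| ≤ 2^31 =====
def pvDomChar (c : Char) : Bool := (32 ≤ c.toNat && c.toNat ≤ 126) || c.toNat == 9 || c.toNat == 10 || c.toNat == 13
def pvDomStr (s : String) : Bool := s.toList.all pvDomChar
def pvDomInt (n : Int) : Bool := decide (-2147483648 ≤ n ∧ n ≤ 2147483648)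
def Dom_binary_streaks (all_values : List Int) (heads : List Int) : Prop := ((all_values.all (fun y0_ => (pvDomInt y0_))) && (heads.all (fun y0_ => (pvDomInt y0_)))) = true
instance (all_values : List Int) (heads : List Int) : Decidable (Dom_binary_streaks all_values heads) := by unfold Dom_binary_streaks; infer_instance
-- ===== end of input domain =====

-- B replaces A's per-element state machine by a two-pointer scan-and-slice pass (objective: alternative).

-- ===== PORT A =====
-- A's loop state: accumulated all_streaks, current curr_streak, heads_streak flag.
def aLoop (heads : List Int) : List Int → List (List Int) → List Int → Bool → List (List Int)
  | [], all_streaks, curr_streak, _ =>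
      if curr_streak = [] then all_streaks else all_streaks ++ [curr_streak]
  | x :: rest, all_streaks, curr_streak, heads_streak =>
      let is_heads : Bool := heads.contains x
      if (is_heads != heads_streak) || (is_heads && heads_streak) then
        aLoop heads rest
          (if curr_streak = [] then all_streaks else all_streaks ++ [curr_streak])
          [x] is_heads
      else
        aLoop heads rest all_streaks (curr_streak ++ [x]) heads_streak

def binary_streaks (all_values : List Int) (heads : List Int) : List (List Int) :=
  aLoop heads all_values [] [] false

-- ===== PORT B =====
-- Source B's inner while loop: number of leading elements of the suffix not in heads.
def findStop (heads : List Int) : List Int → Nat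
  | [] => 0
  | x :: r => if heads.contains x then 0 else 1 + findStop heads r

-- Source B's outer while loop: `suffix` is all_values[i:]; j is kept relative to i,
-- so all_values[i:j] = suffix.take j, all_values[j] = suffix.getD j 0 (j < length there),
-- and i = j + 1 advances to suffix.drop (j+1).
def bOuter (heads : List Int) (suffix : List Int) (streaks : List (List Int)) : List (List Int) :=
  if hne : suffix = [] then streaks
  else
    let j := findStop heads suffix
    let streaks1 := if 0 < j then streaks ++ [suffix.take j] else streaks
    let streaks2 := if j < suffix.length then streaks1 ++ [[suffix.getD j 0]] else streaks1
    bOuter heads (suffix.drop (j + 1)) streaks2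
termination_by suffix.length
decreasing_by
  have : 0 < suffix.length := List.length_pos_of_ne_nil hne
  simp only [List.length_drop]; omega

def binary_streaks_alt (all_values : List Int) (heads : List Int) : List (List Int) :=
  bOuter heads all_values []

-- ===== PRECONDITION & SPEC =====
def Spec_binary_streaks (all_values : List Int) (heads : List Int) (out : List (List Int)) : Prop := out = binary_streaks_alt all_values heads
instance (all_values : List Int) (heads : List Int) (out : List (List Int)) : Decidable (Spec_binary_streaks all_values heads out) := by unfold Spec_binary_streaks; infer_instance

-- ===== CLAIM (what is proved, stated in full; the proofs are below) =====
def Claim_equal_binary_streaks : Prop := ∀ (all_values : List Int) (heads : List Int), Dom_binary_streaks all_values heads → Spec_binary_streaks all_values heads (binary_streaks all_values heads)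

-- ===== LEMMAS AND PROOFS =====

-- Proof-only intermediate: a one-pass accumulator form of the grouping.
def bLoop (heads : List Int) : List Int → List (List Int) → List Int → List (List Int)
  | [], all_streaks, run =>
      if run = [] then all_streaks else all_streaks ++ [run]
  | x :: rest, all_streaks, run =>
      if heads.contains x then
        bLoop heads rest
          ((if run = [] then all_streaks else all_streaks ++ [run]) ++ [[x]]) []
      else
        bLoop heads rest all_streaks (run ++ [x])

-- Joint loop invariant relating A's state machine to bLoop.
theorem loop_invariant (heads vals : List Int) :
    (∀ (streaks : List (List Int)) (curr : List Int),
        aLoop heads vals streaks curr false = bLoop heads vals streaks curr) ∧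
    (∀ (streaks : List (List Int)) (curr : List Int), curr ≠ [] →
        aLoop heads vals streaks curr true = bLoop heads vals (streaks ++ [curr]) []) := by
  induction vals with
  | nil =>
      refine ⟨fun streaks curr => rfl, fun streaks curr h => ?_⟩
      simp [aLoop, bLoop, h]
  | cons x rest ih =>
      obtain ⟨ih₀, ih₁⟩ := ih
      constructor
      · intro streaks curr
        by_cases hx : x ∈ heads
        · have hx' : heads.contains x = true := by simpa using hx
          by_cases hc : curr = [] <;>
            simp [aLoop, bLoop, hx, hc, ih₁ _ [x] (by simp)]
        · have hx' : heads.contains x = false := by simpa using hx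
          simp [aLoop, bLoop, hx, ih₀]
      · intro streaks curr hne
        by_cases hx : x ∈ heads
        · have hx' : heads.contains x = true := by simpa using hx
          simp [aLoop, bLoop, hx, hne, ih₁ _ [x] (by simp)]
        · have hx' : heads.contains x = false := by simpa using hx
          simp [aLoop, bLoop, hx, hne, ih₀]

theorem findStop_append (heads run l : List Int)
    (h : ∀ y ∈ run, heads.contains y = false) :
    findStop heads (run ++ l) = run.length + findStop heads l := by
  induction run with
  | nil => simp
  | cons y r ih =>
      have hy : y ∉ heads := by simpa using h y (by simp)
      simp [findStop, hy, ih (fun z hz => h z (by simp [hz]))]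
      omega

-- bLoop with a run of accumulated non-heads equals bOuter on run ++ vals.
theorem bOuter_nil (heads : List Int) (streaks : List (List Int)) :
    bOuter heads [] streaks = streaks := by
  rw [bOuter]; simp

theorem bLoop_eq_bOuter (heads : List Int) (vals : List Int) :
    ∀ (streaks : List (List Int)) (run : List Int),
      (∀ y ∈ run, heads.contains y = false) →
      bLoop heads vals streaks run = bOuter heads (run ++ vals) streaks := by
  induction vals with
  | nil =>
      intro streaks run hrun
      rcases eq_or_ne run [] with h | h
      · subst h; simp [bLoop, bOuter_nil]
      · have hfs0 : findStop heads run = run.length := by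
          simpa [findStop] using findStop_append heads run [] hrun
        have hlen : 0 < run.length := List.length_pos_of_ne_nil h
        rw [List.append_nil, bOuter, dif_neg h]
        simp only [hfs0, List.take_length, if_pos hlen, lt_irrefl, if_false]
        rw [show run.drop (run.length + 1) = [] from by simp, bOuter_nil]
        simp [bLoop, h]
  | cons x rest ih =>
      intro streaks run hrun
      by_cases hx : heads.contains x = true
      · have hxm : x ∈ heads := by simpa using hx
        have hfs : findStop heads (run ++ x :: rest) = run.length := by
          have h0 : findStop heads (x :: rest) = 0 := by simp [findStop, hxm]
          simpa [h0] using findStop_append heads run (x :: rest) hrun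
        have hne' : run ++ x :: rest ≠ [] := by simp
        have htake : (run ++ x :: rest).take run.length = run := List.take_left ..
        have hget : (run ++ x :: rest).getD run.length 0 = x := by
          simp [List.getD]
        have hdrop : (run ++ x :: rest).drop (run.length + 1) = rest := by
          have hassoc : run ++ x :: rest = (run ++ [x]) ++ rest := by simp
          have hlen1 : (run ++ [x]).length = run.length + 1 := by simp
          rw [hassoc, ← hlen1, List.drop_left]
        have hj : run.length < (run ++ x :: rest).length := by simp
        have hLHS : bLoop heads (x :: rest) streaks run
            = bOuter heads rest ((if run = [] then streaks else streaks ++ [run]) ++ [[x]]) := by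
          simp only [bLoop, if_pos hx]
          rw [ih _ [] (by simp)]
          simp
        rw [hLHS]
        conv_rhs => rw [bOuter]
        rw [dif_neg hne']
        simp only [hfs, htake, hget, hdrop, if_pos hj]
        congr 1
        rcases eq_or_ne run [] with h | h
        · subst h; simp
        · have hlen : 0 < run.length := List.length_pos_of_ne_nil h
          simp [h, hlen]
      · have hx' : heads.contains x = false := by simpa using hx
        have hxm : x ∉ heads := by simpa using hx'
        have hstep : bLoop heads (x :: rest) streaks run
            = bLoop heads rest streaks (run ++ [x]) := by
          simp [bLoop, hxm]
        rw [hstep, ih _ (run ++ [x]) (by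
          intro y hy
          rcases List.mem_append.mp hy with hmem | hmem
          · exact hrun y hmem
          · simp only [List.mem_singleton] at hmem; subst hmem; exact hx')]
        simp

-- ===== VERDICT (by name: the statement is the Claim_ definition above) =====
theorem binary_streaks_spec : Claim_equal_binary_streaks := by
  intro all_values heads _
  unfold Spec_binary_streaks binary_streaks binary_streaks_alt
  rw [(loop_invariant heads all_values).1 [] []]
  simpa using bLoop_eq_bOuter heads all_values [] [] (by simp)
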